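-- pv_equiv track=rewrite | github.com/THF151/blocus-engine-cs-630 | backend/example/example_simulation.py | piece_cells
-- ===== SOURCE A (Python) =====
-- PIECE_SHAPES: dict[int, list[tuple[int, int]]] = {
--     0: [(0, 0)],
--     1: [(0, 0), (0, 1)],
--     2: [(0, 0), (0, 1), (0, 2)],
--     3: [(0, 0), (1, 0), (1, 1)],
--     4: [(0, 0), (0, 1), (0, 2), (0, 3)],
--     5: [(0, 0), (0, 1), (1, 0), (1, 1)],
--     6: [(0, 0), (0, 1), (0, 2), (1, 1)],
--     7: [(0, 0), (1, 0), (2, 0), (2, 1)],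
--     8: [(0, 0), (0, 1), (1, 1), (1, 2)],
--     9: [(0, 1), (1, 0), (1, 1), (1, 2), (2, 2)],
--     10: [(0, 0), (0, 1), (0, 2), (0, 3), (0, 4)],
--     11: [(0, 0), (1, 0), (2, 0), (3, 0), (3, 1)],
--     12: [(0, 1), (1, 1), (2, 0), (2, 1), (3, 0)],
--     13: [(0, 0), (0, 1), (1, 0), (1, 1), (2, 0)],
--     14: [(0, 0), (0, 1), (0, 2), (1, 1), (2, 1)],
--     15: [(0, 0), (0, 2), (1, 0), (1, 1), (1, 2)],
--     16: [(0, 0), (1, 0), (2, 0), (2, 1), (2, 2)],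
--     17: [(0, 0), (1, 0), (1, 1), (2, 1), (2, 2)],
--     18: [(0, 1), (1, 0), (1, 1), (1, 2), (2, 1)],
--     19: [(0, 0), (1, 0), (2, 0), (3, 0), (2, 1)],
--     20: [(0, 0), (0, 1), (1, 1), (2, 1), (2, 2)],
-- }
--
-- def normalize(cells: list[tuple[int, int]]) -> list[tuple[int, int]]:
--     min_row = min(row for row, _ in cells)
--     min_col = min(col for _, col in cells)
--     return sorted((row - min_row, col - min_col) for row, col in cells)
--
-- def transform(
--     cells: list[tuple[int, int]],
--     rotation: int,
--     flip_horizontal: bool,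
-- ) -> list[tuple[int, int]]:
--     normalized = normalize(cells)
--     width = max(col for _, col in normalized) + 1
--     height = max(row for row, _ in normalized) + 1
--
--     transformed: list[tuple[int, int]] = []
--
--     for row, col in normalized:
--         if flip_horizontal:
--             col = width - 1 - col
--
--         if rotation == 0:
--             next_row, next_col = row, col
--         elif rotation == 90:
--             next_row, next_col = col, height - 1 - row
--         elif rotation == 180:
--             next_row, next_col = height - 1 - row, width - 1 - col
--         elif rotation == 270:
--             next_row, next_col = width - 1 - col, row
--         else:
--             raise ValueError(f"unsupported rotation: {rotation}")
--
--         transformed.append((next_row, next_col))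
--
--     return normalize(transformed)
--
-- def unique_orientations(piece_id: int) -> list[list[tuple[int, int]]]:
--     base = PIECE_SHAPES[piece_id]
--     orientations: list[list[tuple[int, int]]] = []
--
--     for flip_horizontal in (False, True):
--         for rotation in (0, 90, 180, 270):
--             orientation = transform(base, rotation, flip_horizontal)
--
--             if orientation not in orientations:
--                 orientations.append(orientation)
--
--     return orientations
--
-- def piece_cells(
--     piece_id: int,
--     orientation_id: int,
--     anchor_row: int,
--     anchor_col: int,
-- ) -> list[tuple[int, int]]:
--     orientations = unique_orientations(piece_id)
--
--     if orientation_id >= len(orientations):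
--         raise ValueError(
--             f"piece {piece_id} has no orientation {orientation_id}; "
--             f"available orientations: {len(orientations)}"
--         )
--
--     return [
--         (anchor_row + local_row, anchor_col + local_col)
--         for local_row, local_col in orientations[orientation_id]
--     ]
-- ===== SOURCE B (Python) =====
-- PIECE_SHAPES: dict[int, list[tuple[int, int]]] = {
--     0: [(0, 0)],
--     1: [(0, 0), (0, 1)],
--     2: [(0, 0), (0, 1), (0, 2)],
--     3: [(0, 0), (1, 0), (1, 1)],
--     4: [(0, 0), (0, 1), (0, 2), (0, 3)],
--     5: [(0, 0), (0, 1), (1, 0), (1, 1)],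
--     6: [(0, 0), (0, 1), (0, 2), (1, 1)],
--     7: [(0, 0), (1, 0), (2, 0), (2, 1)],
--     8: [(0, 0), (0, 1), (1, 1), (1, 2)],
--     9: [(0, 1), (1, 0), (1, 1), (1, 2), (2, 2)],
--     10: [(0, 0), (0, 1), (0, 2), (0, 3), (0, 4)],
--     11: [(0, 0), (1, 0), (2, 0), (3, 0), (3, 1)],
--     12: [(0, 1), (1, 1), (2, 0), (2, 1), (3, 0)],
--     13: [(0, 0), (0, 1), (1, 0), (1, 1), (2, 0)],
--     14: [(0, 0), (0, 1), (0, 2), (1, 1), (2, 1)],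
--     15: [(0, 0), (0, 2), (1, 0), (1, 1), (1, 2)],
--     16: [(0, 0), (1, 0), (2, 0), (2, 1), (2, 2)],
--     17: [(0, 0), (1, 0), (1, 1), (2, 1), (2, 2)],
--     18: [(0, 1), (1, 0), (1, 1), (1, 2), (2, 1)],
--     19: [(0, 0), (1, 0), (2, 0), (3, 0), (2, 1)],
--     20: [(0, 0), (0, 1), (1, 1), (2, 1), (2, 2)],
-- }
--
--
-- def _grid(cells: list[tuple[int, int]]) -> list[list[bool]]:
--     height = max(row for row, _ in cells) + 1
--     width = max(col for _, col in cells) + 1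
--     grid = [[False] * width for _ in range(height)]
--     for row, col in cells:
--         grid[row][col] = True
--     return grid
--
--
-- def _cells(grid: list[list[bool]]) -> list[tuple[int, int]]:
--     return [
--         (row, col)
--         for row, line in enumerate(grid)
--         for col, occupied in enumerate(line)
--         if occupied
--     ]
--
--
-- def _orientations(piece_id: int) -> list[list[tuple[int, int]]]:
--     orientations: list[list[tuple[int, int]]] = []
--     for flip_horizontal in (False, True):
--         grid = _grid(PIECE_SHAPES[piece_id])
--         if flip_horizontal:
--             grid = [list(reversed(line)) for line in grid]
--         for _ in range(4):
--             orientation = _cells(grid)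
--             if orientation not in orientations:
--                 orientations.append(orientation)
--             grid = [list(line) for line in zip(*reversed(grid))]  # rotate 90 deg clockwise
--     return orientations
--
--
-- def piece_cells(
--     piece_id: int,
--     orientation_id: int,
--     anchor_row: int,
--     anchor_col: int,
-- ) -> list[tuple[int, int]]:
--     orientations = _orientations(piece_id)
--
--     if orientation_id >= len(orientations):
--         raise ValueError(
--             f"piece {piece_id} has no orientation {orientation_id}; "
--             f"available orientations: {len(orientations)}"
--         )
--
--     return [
--         (anchor_row + local_row, anchor_col + local_col)
--         for local_row, local_col in orientations[orientation_id]
--     ]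
-- ===== Notes on version B (the rewrite author's own statement) =====
-- stated objective: idiomatic
-- what changed: B represents the piece as a 2D boolean grid over its bounding box, flips by reversing rows and rotates by iterating zip(*reversed(grid)), reading cells back in row-major order, instead of A's normalize/per-cell rotation-formula arithmetic; enumeration order and first-seen dedup are identical.
import Mathlib
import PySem

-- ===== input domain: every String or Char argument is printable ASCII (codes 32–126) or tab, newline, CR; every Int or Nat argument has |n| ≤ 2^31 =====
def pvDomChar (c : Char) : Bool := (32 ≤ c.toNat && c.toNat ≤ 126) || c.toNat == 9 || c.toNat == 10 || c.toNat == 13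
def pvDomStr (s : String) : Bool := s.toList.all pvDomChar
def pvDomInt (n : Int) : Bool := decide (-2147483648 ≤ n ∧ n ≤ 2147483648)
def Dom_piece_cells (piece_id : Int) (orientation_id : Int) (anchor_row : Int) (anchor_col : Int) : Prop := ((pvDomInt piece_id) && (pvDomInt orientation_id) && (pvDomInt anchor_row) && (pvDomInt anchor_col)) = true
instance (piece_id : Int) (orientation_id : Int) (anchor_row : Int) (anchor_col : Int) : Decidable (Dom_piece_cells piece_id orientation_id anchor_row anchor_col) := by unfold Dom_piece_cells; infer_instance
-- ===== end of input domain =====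

-- B replaces A's per-cell rotation formulas by a 2D boolean grid rotated via reverse+transpose (idiomatic); return values proved equal.


-- shared module constant (identical in Source A and Source B)
def PIECE_SHAPES : PySem.Dict Int (List (Int × Int)) := PySem.Dict.ofList [
  (0, [(0, 0)]),
  (1, [(0, 0), (0, 1)]),
  (2, [(0, 0), (0, 1), (0, 2)]),
  (3, [(0, 0), (1, 0), (1, 1)]),
  (4, [(0, 0), (0, 1), (0, 2), (0, 3)]),
  (5, [(0, 0), (0, 1), (1, 0), (1, 1)]),
  (6, [(0, 0), (0, 1), (0, 2), (1, 1)]),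
  (7, [(0, 0), (1, 0), (2, 0), (2, 1)]),
  (8, [(0, 0), (0, 1), (1, 1), (1, 2)]),
  (9, [(0, 1), (1, 0), (1, 1), (1, 2), (2, 2)]),
  (10, [(0, 0), (0, 1), (0, 2), (0, 3), (0, 4)]),
  (11, [(0, 0), (1, 0), (2, 0), (3, 0), (3, 1)]),
  (12, [(0, 1), (1, 1), (2, 0), (2, 1), (3, 0)]),
  (13, [(0, 0), (0, 1), (1, 0), (1, 1), (2, 0)]),
  (14, [(0, 0), (0, 1), (0, 2), (1, 1), (2, 1)]),
  (15, [(0, 0), (0, 2), (1, 0), (1, 1), (1, 2)]),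
  (16, [(0, 0), (1, 0), (2, 0), (2, 1), (2, 2)]),
  (17, [(0, 0), (1, 0), (1, 1), (2, 1), (2, 2)]),
  (18, [(0, 1), (1, 0), (1, 1), (1, 2), (2, 1)]),
  (19, [(0, 0), (1, 0), (2, 0), (3, 0), (2, 1)]),
  (20, [(0, 0), (0, 1), (1, 1), (2, 1), (2, 2)])]

-- ===== PORT A =====

-- min()/max() over a generator: cells is nonempty at every call site (shapes are nonempty), so the .getD 0 arm is unreachable (exact there)
def normalizeCells (cells : List (Int × Int)) : List (Int × Int) :=
  let min_row := (PySem.List.min? (cells.map (fun rc => rc.1)) (fun x => x)).getD 0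
  let min_col := (PySem.List.min? (cells.map (fun rc => rc.2)) (fun x => x)).getD 0
  -- sorted() on int pairs = lexicographic = sorted with key (fst, snd)
  PySem.List.sorted2 (cells.map (fun rc => (rc.1 - min_row, rc.2 - min_col))) (·.1) (·.2)

def transform (cells : List (Int × Int)) (rotation : Int) (flip_horizontal : Bool) : List (Int × Int) :=
  let normalized := normalizeCells cells
  let width := (PySem.List.max? (normalized.map (fun rc => rc.2)) (fun x => x)).getD 0 + 1
  let height := (PySem.List.max? (normalized.map (fun rc => rc.1)) (fun x => x)).getD 0 + 1
  let transformed := normalized.foldl (fun acc rc =>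
    let row := rc.1
    let col := if flip_horizontal then width - 1 - rc.2 else rc.2
    if rotation = 0 then acc ++ [(row, col)]
    else if rotation = 90 then acc ++ [(col, height - 1 - row)]
    else if rotation = 180 then acc ++ [(height - 1 - row, width - 1 - col)]
    else if rotation = 270 then acc ++ [(width - 1 - col, row)]
    else acc  -- raise ValueError: unreachable, rotation ∈ {0,90,180,270} at every call site
    ) []
  normalizeCells transformed

def unique_orientations (piece_id : Int) : List (List (Int × Int)) :=
  let base := (PySem.Dict.get? PIECE_SHAPES piece_id).getD []  -- KeyError for unknown piece_id: excluded by Pre_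
  [false, true].foldl (fun os flip_horizontal =>
    [(0 : Int), 90, 180, 270].foldl (fun os rotation =>
      let orientation := transform base rotation flip_horizontal
      if os.contains orientation then os else os ++ [orientation]) os) []

def piece_cells (piece_id : Int) (orientation_id : Int) (anchor_row : Int) (anchor_col : Int) : List (Int × Int) :=
  let orientations := unique_orientations piece_id
  if orientation_id ≥ (orientations.length : Int) then []  -- raise ValueError: excluded by Pre_
  else ((PySem.List.pyGet? orientations orientation_id).getD []).map
    (fun lc => (anchor_row + lc.1, anchor_col + lc.2))

-- ===== PORT B =====

-- max() over a generator: cells nonempty at every call site (exact there); grid indices are ≥ 0 for all shapes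
def bGrid (cells : List (Int × Int)) : List (List Bool) :=
  let height := ((PySem.List.max? (cells.map (fun rc : Int × Int => rc.1)) (fun x => x)).getD 0).toNat + 1
  let width := ((PySem.List.max? (cells.map (fun rc : Int × Int => rc.2)) (fun x => x)).getD 0).toNat + 1
  cells.foldl (fun g rc => g.modify rc.1.toNat (fun line => line.set rc.2.toNat true))
    (List.replicate height (List.replicate width false))

def bCells (grid : List (List Bool)) : List (Int × Int) :=
  (PySem.List.enumerate grid).flatMap (fun rl =>
    (PySem.List.enumerate rl.2).filterMap (fun co =>
      if co.2 then some (rl.1, co.1) else none))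

-- zip(*rows): one column-tuple per index until the shortest row is exhausted (Python-exact for rows of Bools);
-- structural recursion on the first row
def bZipStarGo : List Bool → List (List Bool) → List (List Bool)
  | [], _ => []
  | x :: xs, rest =>
    if rest.all (fun r => !r.isEmpty) then
      (x :: rest.map (fun r => r.headD false)) :: bZipStarGo xs (rest.map List.tail)
    else []

def bZipStar (rows : List (List Bool)) : List (List Bool) :=
  match rows with
  | [] => []
  | a :: as => bZipStarGo a as

def bOrientations (piece_id : Int) : List (List (Int × Int)) :=
  [false, true].foldl (fun os flip_horizontal =>
    let grid0 := bGrid ((PySem.Dict.get? PIECE_SHAPES piece_id).getD [])  -- KeyError: excluded by Pre_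
    let grid0 := if flip_horizontal then grid0.map List.reverse else grid0
    ((List.range 4).foldl (fun st _ =>
      let orientation := bCells st.2
      let os := if st.1.contains orientation then st.1 else st.1 ++ [orientation]
      -- zip(*reversed(grid)): exact as transpose of the reversed grid since every grid here is rectangular
      (os, bZipStar st.2.reverse)) (os, grid0)).1) []

def piece_cells_alt (piece_id : Int) (orientation_id : Int) (anchor_row : Int) (anchor_col : Int) : List (Int × Int) :=
  let orientations := bOrientations piece_id
  if orientation_id ≥ (orientations.length : Int) then []  -- raise ValueError: excluded by Pre_
  else ((PySem.List.pyGet? orientations orientation_id).getD []).map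
    (fun lc => (anchor_row + lc.1, anchor_col + lc.2))

-- ===== PRECONDITION & SPEC =====

-- number of distinct orientations of each piece (a fixed table, not computed by either port)
def numOrientations (piece_id : Int) : Int :=
  if piece_id = 0 ∨ piece_id = 5 ∨ piece_id = 18 then 1
  else if piece_id = 1 ∨ piece_id = 2 ∨ piece_id = 4 ∨ piece_id = 10 then 2
  else if piece_id = 7 ∨ piece_id = 9 ∨ piece_id = 11 ∨ piece_id = 12 ∨ piece_id = 13 ∨ piece_id = 19 then 8
  else 4

-- A raises KeyError for piece_id outside 0..20, ValueError for orientation_id ≥ the piece's orientation count,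
-- IndexError for orientation_id < -count; Pre_ admits exactly the inputs where A returns (negative indices wrap as in Python).
def Pre_piece_cells (piece_id : Int) (orientation_id : Int) (anchor_row : Int) (anchor_col : Int) : Prop :=
  0 ≤ piece_id ∧ piece_id ≤ 20 ∧
  -(numOrientations piece_id) ≤ orientation_id ∧ orientation_id < numOrientations piece_id
instance (piece_id : Int) (orientation_id : Int) (anchor_row : Int) (anchor_col : Int) : Decidable (Pre_piece_cells piece_id orientation_id anchor_row anchor_col) := by unfold Pre_piece_cells; infer_instance

def pvWitness_piece_cells : Int × Int × Int × Int := (9, 3, 2, -1)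

def Spec_piece_cells (piece_id : Int) (orientation_id : Int) (anchor_row : Int) (anchor_col : Int) (out : List (Int × Int)) : Prop := out = piece_cells_alt piece_id orientation_id anchor_row anchor_col
instance (piece_id : Int) (orientation_id : Int) (anchor_row : Int) (anchor_col : Int) (out : List (Int × Int)) : Decidable (Spec_piece_cells piece_id orientation_id anchor_row anchor_col out) := by unfold Spec_piece_cells; infer_instance

-- ===== CLAIM (what is proved, stated in full; the proofs are below) =====
def Claim_equal_piece_cells : Prop := ∀ (piece_id : Int) (orientation_id : Int) (anchor_row : Int) (anchor_col : Int), Dom_piece_cells piece_id orientation_id anchor_row anchor_col → Pre_piece_cells piece_id orientation_id anchor_row anchor_col → Spec_piece_cells piece_id orientation_id anchor_row anchor_col (piece_cells piece_id orientation_id anchor_row anchor_col)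

-- ===== LEMMAS AND PROOFS =====

-- the two orientation enumerations agree on every piece the table has
theorem orientations_eq (p : Int) (h0 : 0 ≤ p) (h1 : p ≤ 20) :
    unique_orientations p = bOrientations p := by
  interval_cases p <;> decide

-- ===== VERDICT (by name: the statement is the Claim_ definition above) =====
theorem piece_cells_spec : Claim_equal_piece_cells := by
  intro p o r c _ hpre
  unfold Spec_piece_cells piece_cells piece_cells_alt
  rw [orientations_eq p hpre.1 hpre.2.1]
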